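-- pv_equiv track=rewrite | github.com/daniel-reich/turbo-robot | tRHaoWNaHBJCYD5Nx_21.py | same_letter_pattern
-- ===== SOURCE A (Python) =====
-- def same_letter_pattern(txt1, txt2):
--   l={}
--   s=[]
--   d={}
--   y=[]
--   c=0
--   e=0
--   for t in txt1:
--     if t in l.keys():
--       s.append(l[t])
--     else:
--       l[t]=c
--       s.append(c)
--       c+=1
--   for p in txt2:
--     if p in d.keys():
--       y.append(d[p])
--     else:
--       d[p]=e
--       y.append(e)
--       e+=1
--   if s==y:
--     return True
--   else:
--     return False
-- ===== SOURCE B (Python) =====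
-- def same_letter_pattern(txt1, txt2):
--     if len(txt1) != len(txt2):
--         return False
--     f = {}
--     g = {}
--     for a, b in zip(txt1, txt2):
--         if f.get(a, b) != b or g.get(b, a) != a:
--             return False
--         f[a] = b
--         g[b] = a
--     return True
-- ===== Notes on version B (the rewrite author's own statement) =====
-- stated objective: idiomatic
-- what changed: Instead of building two full normalized index sequences (char -> rank dicts) and comparing the lists at the end, B checks the length once and maintains an incremental bijection with forward and backward char->char maps in a single zipped pass, returning False at the first conflict.
import Mathlib
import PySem

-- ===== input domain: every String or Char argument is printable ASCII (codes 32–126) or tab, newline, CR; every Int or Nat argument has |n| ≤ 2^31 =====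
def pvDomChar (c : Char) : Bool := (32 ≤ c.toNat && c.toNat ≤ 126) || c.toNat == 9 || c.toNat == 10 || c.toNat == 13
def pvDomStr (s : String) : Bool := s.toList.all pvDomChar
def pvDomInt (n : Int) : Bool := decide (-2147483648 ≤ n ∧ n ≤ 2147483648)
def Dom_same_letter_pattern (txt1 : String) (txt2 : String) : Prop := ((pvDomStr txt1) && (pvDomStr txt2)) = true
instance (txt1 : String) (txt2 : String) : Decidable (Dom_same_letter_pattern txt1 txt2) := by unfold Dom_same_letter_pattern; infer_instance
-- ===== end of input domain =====

-- B replaces A's two normalized index sequences (char->rank dicts, then list comparison) by one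
-- zipped pass maintaining an incremental bijection with forward/backward char->char maps (idiomatic).

-- ===== PORT A =====
-- the 'for t in txt' loop of A: dict char->rank, counter c, emits the rank list s
def pvNormLoop (ts : List Char) (l : PySem.Dict Char Int) (c : Int) : List Int :=
  match ts with
  | [] => []
  | t :: ts' =>
    match l.get? t with
    | some v => v :: pvNormLoop ts' l c
    | none => c :: pvNormLoop ts' (l.insert t c) (c + 1)

def same_letter_pattern (txt1 : String) (txt2 : String) : Bool :=
  let s := pvNormLoop txt1.toList PySem.Dict.empty 0
  let y := pvNormLoop txt2.toList PySem.Dict.empty 0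
  if s = y then true else false

-- ===== PORT B =====
-- the 'for a, b in zip(...)' loop of B with forward map f and backward map g
def pvBijLoop (as' : List Char) (bs : List Char) (f g : PySem.Dict Char Char) : Bool :=
  match as', bs with
  | a :: as'', b :: bs' =>
    if f.getD a b ≠ b ∨ g.getD b a ≠ a then false
    else pvBijLoop as'' bs' (f.insert a b) (g.insert b a)
  | _, _ => true

def same_letter_pattern_alt (txt1 : String) (txt2 : String) : Bool :=
  if PySem.Str.len txt1 ≠ PySem.Str.len txt2 then false
  else pvBijLoop txt1.toList txt2.toList PySem.Dict.empty PySem.Dict.empty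

-- ===== PRECONDITION & SPEC =====
def Spec_same_letter_pattern (txt1 : String) (txt2 : String) (out : Bool) : Prop := out = same_letter_pattern_alt txt1 txt2
instance (txt1 : String) (txt2 : String) (out : Bool) : Decidable (Spec_same_letter_pattern txt1 txt2 out) := by unfold Spec_same_letter_pattern; infer_instance

-- ===== CLAIM (what is proved, stated in full; the proofs are below) =====
def Claim_equal_same_letter_pattern : Prop := ∀ (txt1 : String) (txt2 : String), Dom_same_letter_pattern txt1 txt2 → Spec_same_letter_pattern txt1 txt2 (same_letter_pattern txt1 txt2)

-- ===== LEMMAS AND PROOFS =====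

-- Invariant tying A's rank dicts (l, d, counters c = e) to B's bijection maps (f, g)
structure PvInv (l d : PySem.Dict Char Int) (c e : Int) (f g : PySem.Dict Char Char) : Prop where
  ce : c = e
  lb_l : ∀ a k, l.get? a = some k → k < c
  lb_d : ∀ b k, d.get? b = some k → k < e
  inj_l : ∀ a a' k, l.get? a = some k → l.get? a' = some k → a = a'
  inj_d : ∀ b b' k, d.get? b = some k → d.get? b' = some k → b = b'
  pair_l : ∀ a k, l.get? a = some k → ∃ b, d.get? b = some k
  pair_d : ∀ b k, d.get? b = some k → ∃ a, l.get? a = some k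
  f_spec : ∀ a b, f.get? a = some b ↔ ∃ k, l.get? a = some k ∧ d.get? b = some k
  g_spec : ∀ b a, g.get? b = some a ↔ ∃ k, l.get? a = some k ∧ d.get? b = some k

theorem pvNormLoop_length (ts : List Char) (l : PySem.Dict Char Int) (c : Int) :
    (pvNormLoop ts l c).length = ts.length := by
  induction ts generalizing l c with
  | nil => simp [pvNormLoop]
  | cons t ts' ih =>
    unfold pvNormLoop
    cases l.get? t <;> simp [ih]

theorem pvInv_empty : PvInv PySem.Dict.empty PySem.Dict.empty 0 0 PySem.Dict.empty PySem.Dict.empty := by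
  constructor <;> simp [PySem.Dict.get?_empty]

theorem pvBijLoop_congr (as' bs : List Char) (f f' g g' : PySem.Dict Char Char)
    (hf : ∀ x, f.get? x = f'.get? x) (hg : ∀ x, g.get? x = g'.get? x) :
    pvBijLoop as' bs f g = pvBijLoop as' bs f' g' := by
  induction as' generalizing bs f f' g g' with
  | nil => cases bs <;> rfl
  | cons a as'' ih =>
    cases bs with
    | nil => rfl
    | cons b bs' =>
      unfold pvBijLoop
      simp only [PySem.Dict.getD_eq_get?_getD, hf, hg]
      split
      · rfl
      · apply ih
        · intro x; rw [PySem.Dict.get?_insert, PySem.Dict.get?_insert]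
          split <;> simp [hf]
        · intro x; rw [PySem.Dict.get?_insert, PySem.Dict.get?_insert]
          split <;> simp [hg]

theorem pvKey (as' bs : List Char) (l d : PySem.Dict Char Int) (c e : Int)
    (f g : PySem.Dict Char Char) (hlen : as'.length = bs.length)
    (inv : PvInv l d c e f g) :
    (pvNormLoop as' l c = pvNormLoop bs d e) ↔ pvBijLoop as' bs f g = true := by
  induction as' generalizing bs l d c e f g with
  | nil =>
    cases bs with
    | nil => simp [pvNormLoop, pvBijLoop]
    | cons b bs' => simp at hlen
  | cons a as'' ih =>
    cases bs with
    | nil => simp at hlen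
    | cons b bs' =>
      simp only [List.length_cons, Nat.add_right_cancel_iff] at hlen
      obtain ⟨ce, lb_l, lb_d, inj_l, inj_d, pair_l, pair_d, f_spec, g_spec⟩ := inv
      subst ce
      rcases hla : l.get? a with _ | va <;> rcases hdb : d.get? b with _ | vb
      · -- both fresh
        have hf : f.get? a = none := by
          rcases h : f.get? a with _ | b0
          · rfl
          · rcases (f_spec a b0).1 h with ⟨k, hk, _⟩
            rw [hla] at hk; cases hk
        have hg : g.get? b = none := by
          rcases h : g.get? b with _ | a0
          · rfl
          · rcases (g_spec b a0).1 h with ⟨k, _, hk⟩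
            rw [hdb] at hk; cases hk
        have inv' : PvInv (l.insert a c) (d.insert b c) (c + 1) (c + 1)
            (f.insert a b) (g.insert b a) := by
          constructor
          · rfl
          · intro x k hx
            rw [PySem.Dict.get?_insert] at hx
            split at hx
            · injection hx with h; omega
            · have := lb_l x k hx; omega
          · intro x k hx
            rw [PySem.Dict.get?_insert] at hx
            split at hx
            · injection hx with h; omega
            · have := lb_d x k hx; omega
          · intro x x' k hx hx'
            rw [PySem.Dict.get?_insert] at hx
            rw [PySem.Dict.get?_insert] at hx'
            split at hx <;> split at hx' <;> rename_i h1 h2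
            · rw [h1, h2]
            · injection hx with h; subst h; have := lb_l x' c hx'; omega
            · injection hx' with h; subst h; have := lb_l x c hx; omega
            · exact inj_l x x' k hx hx'
          · intro x x' k hx hx'
            rw [PySem.Dict.get?_insert] at hx
            rw [PySem.Dict.get?_insert] at hx'
            split at hx <;> split at hx' <;> rename_i h1 h2
            · rw [h1, h2]
            · injection hx with h; subst h; have := lb_d x' c hx'; omega
            · injection hx' with h; subst h; have := lb_d x c hx; omega
            · exact inj_d x x' k hx hx'
          · intro x k hx
            rw [PySem.Dict.get?_insert] at hx
            split at hx
            · injection hx with h; subst h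
              exact ⟨b, by rw [PySem.Dict.get?_insert]; simp⟩
            · rcases pair_l x k hx with ⟨b0, hb0⟩
              refine ⟨b0, ?_⟩
              rw [PySem.Dict.get?_insert]
              have : b0 ≠ b := fun h => by rw [h, hdb] at hb0; cases hb0
              simp [this, hb0]
          · intro x k hx
            rw [PySem.Dict.get?_insert] at hx
            split at hx
            · injection hx with h; subst h
              exact ⟨a, by rw [PySem.Dict.get?_insert]; simp⟩
            · rcases pair_d x k hx with ⟨a0, ha0⟩
              refine ⟨a0, ?_⟩
              rw [PySem.Dict.get?_insert]
              have : a0 ≠ a := fun h => by rw [h, hla] at ha0; cases ha0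
              simp [this, ha0]
          · intro x y
            rw [PySem.Dict.get?_insert, PySem.Dict.get?_insert]
            by_cases hxa : x = a
            · subst hxa
              simp only [if_pos rfl]
              constructor
              · rintro h; injection h with h; subst h
                exact ⟨c, rfl, by rw [PySem.Dict.get?_insert]; simp⟩
              · rintro ⟨k, hk, hk'⟩
                injection hk with hk; subst hk
                rw [PySem.Dict.get?_insert] at hk'
                split at hk'
                · rename_i h; simp [h]
                · have := lb_d y c hk'; omega
            · simp only [if_neg hxa]
              constructor
              · intro h
                rcases (f_spec x y).1 h with ⟨k, hk, hk'⟩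
                refine ⟨k, hk, ?_⟩
                rw [PySem.Dict.get?_insert]
                have : y ≠ b := fun hyb => by rw [hyb, hdb] at hk'; cases hk'
                simp [this, hk']
              · rintro ⟨k, hk, hk'⟩
                rw [PySem.Dict.get?_insert] at hk'
                split at hk'
                · injection hk' with hk'; subst hk'
                  have := lb_l x c hk; omega
                · exact (f_spec x y).2 ⟨k, hk, hk'⟩
          · intro y x
            rw [PySem.Dict.get?_insert]
            by_cases hyb : y = b
            · subst hyb
              simp only [if_pos rfl]
              constructor
              · rintro h; injection h with h; subst h
                exact ⟨c, by rw [PySem.Dict.get?_insert]; simp, by rw [PySem.Dict.get?_insert]; simp⟩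
              · rintro ⟨k, hk, hk'⟩
                rw [PySem.Dict.get?_insert] at hk'
                simp only [if_pos rfl] at hk'
                injection hk' with hk'; subst hk'
                rw [PySem.Dict.get?_insert] at hk
                split at hk
                · rename_i h; simp [h]
                · have := lb_l x c hk; omega
            · simp only [if_neg hyb]
              constructor
              · intro h
                rcases (g_spec y x).1 h with ⟨k, hk, hk'⟩
                have hxa : x ≠ a := fun hx => by rw [hx, hla] at hk; cases hk
                refine ⟨k, by rw [PySem.Dict.get?_insert]; simp [hxa, hk], ?_⟩
                rw [PySem.Dict.get?_insert]; simp [hyb, hk']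
              · rintro ⟨k, hk, hk'⟩
                rw [PySem.Dict.get?_insert] at hk'
                simp only [if_neg hyb] at hk'
                rw [PySem.Dict.get?_insert] at hk
                split at hk
                · injection hk with hk; subst hk
                  have := lb_d y c hk'; omega
                · exact (g_spec y x).2 ⟨k, hk, hk'⟩
        have hrec := ih bs' (l.insert a c) (d.insert b c) (c + 1) (c + 1)
          (f.insert a b) (g.insert b a) hlen inv'
        unfold pvNormLoop pvBijLoop
        rw [hla, hdb]
        simp only [PySem.Dict.getD_eq_get?_getD, hf, hg, Option.getD_none]
        simp [hrec]
      · -- a fresh, b seen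
        have hne : (c : Int) ≠ vb := by have := lb_d b vb hdb; omega
        have hf : f.get? a = none := by
          rcases h : f.get? a with _ | b0
          · rfl
          · rcases (f_spec a b0).1 h with ⟨k, hk, _⟩
            rw [hla] at hk; cases hk
        rcases pair_d b vb hdb with ⟨a0, ha0⟩
        have hg : g.get? b = some a0 := (g_spec b a0).2 ⟨vb, ha0, hdb⟩
        have ha0a : a0 ≠ a := fun h => by rw [h, hla] at ha0; cases ha0
        unfold pvNormLoop pvBijLoop
        rw [hla, hdb]
        simp only [PySem.Dict.getD_eq_get?_getD, hf, hg, Option.getD_none, Option.getD_some]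
        simp [hne, ha0a]
      · -- a seen, b fresh
        have hne : va ≠ (c : Int) := by have := lb_l a va hla; omega
        rcases pair_l a va hla with ⟨b0, hb0⟩
        have hf : f.get? a = some b0 := (f_spec a b0).2 ⟨va, hla, hb0⟩
        have hb0b : b0 ≠ b := fun h => by rw [h, hdb] at hb0; cases hb0
        unfold pvNormLoop pvBijLoop
        rw [hla, hdb]
        simp only [PySem.Dict.getD_eq_get?_getD, hf, Option.getD_some]
        simp [hne, hb0b]
      · -- both seen
        unfold pvNormLoop pvBijLoop
        rw [hla, hdb]
        rcases pair_l a va hla with ⟨b0, hb0⟩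
        have hf : f.get? a = some b0 := (f_spec a b0).2 ⟨va, hla, hb0⟩
        by_cases hv : va = vb
        · subst hv
          have hb0b : b0 = b := inj_d b0 b va hb0 hdb
          subst hb0b
          have hg : g.get? b0 = some a := (g_spec b0 a).2 ⟨va, hla, hdb⟩
          have hrec := ih bs' l d c c f g hlen
            ⟨rfl, lb_l, lb_d, inj_l, inj_d, pair_l, pair_d, f_spec, g_spec⟩
          have hcongr : pvBijLoop as'' bs' (f.insert a b0) (g.insert b0 a) =
              pvBijLoop as'' bs' f g := by
            apply pvBijLoop_congr
            · intro x; rw [PySem.Dict.get?_insert]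
              split
              · rename_i h; rw [h, hf]
              · rfl
            · intro x; rw [PySem.Dict.get?_insert]
              split
              · rename_i h; rw [h, hg]
              · rfl
          simp only [PySem.Dict.getD_eq_get?_getD, hf, hg, Option.getD_some]
          simp [hcongr, hrec]
        · have hb0b : b0 ≠ b := fun h => by
            rw [h, hdb] at hb0; injection hb0 with h'; exact hv h'.symm
          simp only [PySem.Dict.getD_eq_get?_getD, hf, Option.getD_some]
          simp [hv, hb0b]

theorem pvStrLen (s : String) : PySem.Str.len s = (s.toList.length : Int) := by
  simp [PySem.Str.len]

-- ===== VERDICT (by name: the statement is the Claim_ definition above) =====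
theorem same_letter_pattern_spec : Claim_equal_same_letter_pattern := by
  intro txt1 txt2 _
  unfold Spec_same_letter_pattern same_letter_pattern same_letter_pattern_alt
  by_cases hlen : txt1.toList.length = txt2.toList.length
  · have hlen' : ¬ (PySem.Str.len txt1 ≠ PySem.Str.len txt2) := by
      simp only [pvStrLen, ne_eq, Nat.cast_inj, not_not]
      exact hlen
    rw [if_neg hlen']
    have h := pvKey txt1.toList txt2.toList _ _ 0 0 _ _ hlen pvInv_empty
    by_cases hc : pvNormLoop txt1.toList PySem.Dict.empty 0 = pvNormLoop txt2.toList PySem.Dict.empty 0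
    · rw [if_pos hc, h.1 hc]
    · rw [if_neg hc]
      cases hb : pvBijLoop txt1.toList txt2.toList PySem.Dict.empty PySem.Dict.empty with
      | false => rfl
      | true => exact absurd (h.2 hb) hc
  · have hne : PySem.Str.len txt1 ≠ PySem.Str.len txt2 := by
      simp only [pvStrLen, ne_eq, Nat.cast_inj]
      exact hlen
    rw [if_pos hne, if_neg]
    intro hc
    have := congrArg List.length hc
    rw [pvNormLoop_length, pvNormLoop_length] at this
    exact hlen this
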